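-- pv_equiv track=rewrite | github.com/white-dots/agent_hub | src/agenthub/parallel/analyzer.py | _greedy_parallel_groups
-- ===== SOURCE A (Python) =====
-- def _greedy_parallel_groups(
--     task_ids: list[str], conflicts: dict[str, set[str]]
-- ) -> list[list[str]]:
--     """Greedily assign tasks to parallel groups (graph coloring)."""
--     groups: list[list[str]] = []
--     assigned: set[str] = set()
--
--     for tid in task_ids:
--         if tid in assigned:
--             continue
--
--         # Find a group where this task has no conflicts
--         placed = False
--         for group in groups:
--             if not any(other in conflicts[tid] for other in group):
--                 group.append(tid)
--                 assigned.add(tid)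
--                 placed = True
--                 break
--
--         if not placed:
--             groups.append([tid])
--             assigned.add(tid)
--
--     return groups
-- ===== SOURCE B (Python) =====
-- def _greedy_parallel_groups(
--     task_ids: list[str], conflicts: dict[str, set[str]]
-- ) -> list[list[str]]:
--     """Greedy first-fit coloring in O(V+E): track each task's group index and
--     pick the lowest group index not blocked by an already-placed conflicting task;
--     a task id missing from conflicts is treated as conflict-free."""
--     groups: list[list[str]] = []
--     pos: dict[str, int] = {}
--
--     for tid in task_ids:
--         if tid in pos:
--             continue
--         blocked = {pos[c] for c in conflicts.get(tid, ()) if c in pos}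
--         g = 0
--         while g in blocked:
--             g += 1
--         if g == len(groups):
--             groups.append([tid])
--         else:
--             groups[g].append(tid)
--         pos[tid] = g
--     return groups
-- ===== Notes on version B (the rewrite author's own statement) =====
-- stated objective: alternative
-- what changed: Instead of rescanning every member of every existing group against the conflict set for each task, B keeps a task->group-index map, computes the set of blocked group indices from the task's conflict list in one pass, and places the task at the lowest free index (O(V+E) worst case vs A's O(V*groups*group_size); measured ~1.3x at the largest timing size, below the 1.5x bar).
import Mathlib
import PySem

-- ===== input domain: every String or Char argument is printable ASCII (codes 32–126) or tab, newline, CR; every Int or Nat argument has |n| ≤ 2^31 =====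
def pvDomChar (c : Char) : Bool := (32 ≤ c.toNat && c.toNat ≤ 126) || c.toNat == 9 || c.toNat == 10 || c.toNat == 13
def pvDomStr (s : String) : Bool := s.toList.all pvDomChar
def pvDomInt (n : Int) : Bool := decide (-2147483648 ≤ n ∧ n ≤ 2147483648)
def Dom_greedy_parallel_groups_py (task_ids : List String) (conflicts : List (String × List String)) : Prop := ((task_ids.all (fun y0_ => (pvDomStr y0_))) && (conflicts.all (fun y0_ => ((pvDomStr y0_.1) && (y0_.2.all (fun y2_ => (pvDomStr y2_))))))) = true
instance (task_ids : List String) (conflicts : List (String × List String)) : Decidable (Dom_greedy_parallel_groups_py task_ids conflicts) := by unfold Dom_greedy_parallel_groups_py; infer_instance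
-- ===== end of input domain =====

-- B replaces A's per-task scan over every member of every existing group by a task→group-index
-- map and a blocked-index set, placing each task at the lowest free index (first-fit unchanged).

-- ===== PORT A =====
-- conflicts[tid]: first-match dict lookup; Python raises KeyError when tid is missing and the
-- lookup is reached — exactly those inputs are excluded by Pre_, so the [] default is never used.
def pvConfA (conflicts : List (String × List String)) (tid : String) : List String :=
  ((PySem.Dict.mk conflicts).get? tid).getD []

-- the inner 'for group in groups' loop with its 'placed' flag
def pvPlaceA (cs : List String) (tid : String) : List (List String) → List (List String)
  | [] => [[tid]]
  | g :: rest =>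
      if g.any (fun other => cs.contains other) then g :: pvPlaceA cs tid rest
      else (g ++ [tid]) :: rest

def greedy_parallel_groups_py (task_ids : List String) (conflicts : List (String × List String)) : List (List String) :=
  (task_ids.foldl
    (fun st tid =>
      if PySem.Set.contains st.2 tid then st
      else (pvPlaceA (pvConfA conflicts tid) tid st.1, PySem.Set.add st.2 tid))
    (([] : List (List String)), (PySem.Set.empty : PySem.Set String))).1

-- ===== PORT B =====
-- conflicts.get(tid, ()) : a missing conflicts entry means no conflicts
def pvConfB (conflicts : List (String × List String)) (tid : String) : List String :=
  ((PySem.Dict.mk conflicts).get? tid).getD []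

-- 'while g in blocked: g += 1'; fuel |blocked| + 1 suffices (blocked is a Set, hence dup-free)
def pvFirstFree (blocked : PySem.Set Nat) (g : Nat) : Nat → Nat
  | 0 => g
  | fuel + 1 => if PySem.Set.contains blocked g then pvFirstFree blocked (g + 1) fuel else g

def pvStepB (conflicts : List (String × List String))
    (st : List (List String) × PySem.Dict String Nat) (tid : String) :
    List (List String) × PySem.Dict String Nat :=
  if st.2.contains tid then st
  else
    let blocked : PySem.Set Nat :=
      PySem.Set.ofList ((pvConfB conflicts tid).filterMap (fun c => st.2.get? c))
    let g := pvFirstFree blocked 0 (blocked.length + 1)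
    (if g = st.1.length then st.1 ++ [[tid]]
     else st.1.set g (st.1.getD g [] ++ [tid]),
     st.2.insert tid g)

def greedy_parallel_groups_py_alt (task_ids : List String) (conflicts : List (String × List String)) : List (List String) :=
  (task_ids.foldl (pvStepB conflicts)
    (([] : List (List String)), (PySem.Dict.empty : PySem.Dict String Nat))).1

-- ===== PRECONDITION & SPEC =====
-- Pre_ excludes exactly the inputs on which A raises KeyError: a distinct task id after the
-- first one that is missing from conflicts (the first task never reaches the lookup because
-- the group list is still empty). A returns on every input Pre_ admits.
def Pre_greedy_parallel_groups_py (task_ids : List String) (conflicts : List (String × List String)) : Prop :=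
  (((PySem.List.dedup task_ids).drop 1).all (fun t => conflicts.any (fun p => p.1 == t))) = true
instance (task_ids : List String) (conflicts : List (String × List String)) : Decidable (Pre_greedy_parallel_groups_py task_ids conflicts) := by unfold Pre_greedy_parallel_groups_py; infer_instance

def pvWitness_greedy_parallel_groups_py : List String × (List (String × List String)) :=
  (["a", "b", "c"], [("a", ["b"]), ("b", ["a"]), ("c", [])])

def Spec_greedy_parallel_groups_py (task_ids : List String) (conflicts : List (String × List String)) (out : List (List String)) : Prop := out = greedy_parallel_groups_py_alt task_ids conflicts
instance (task_ids : List String) (conflicts : List (String × List String)) (out : List (List String)) : Decidable (Spec_greedy_parallel_groups_py task_ids conflicts out) := by unfold Spec_greedy_parallel_groups_py; infer_instance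

-- ===== CLAIM (what is proved, stated in full; the proofs are below) =====
def Claim_equal_greedy_parallel_groups_py : Prop := ∀ (task_ids : List String) (conflicts : List (String × List String)), Dom_greedy_parallel_groups_py task_ids conflicts → Pre_greedy_parallel_groups_py task_ids conflicts → Spec_greedy_parallel_groups_py task_ids conflicts (greedy_parallel_groups_py task_ids conflicts)

-- ===== LEMMAS AND PROOFS =====

-- invariant tying A's state (groups, assigned-set) to B's state (groups, task→index map)
def pvInv (groups : List (List String)) (assigned : PySem.Set String) (pos : PySem.Dict String Nat) : Prop :=
  (∀ t, PySem.Set.contains assigned t = pos.contains t) ∧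
  (∀ t i, pos.get? t = some i ↔ (i < groups.length ∧ t ∈ groups.getD i []))

lemma pvFirstFree_spec (blocked : List Nat) :
    ∀ (fuel g : Nat), (blocked.filter (fun b => g ≤ b)).length < fuel →
      pvFirstFree blocked g fuel ∉ blocked ∧ g ≤ pvFirstFree blocked g fuel ∧
      ∀ j, g ≤ j → j < pvFirstFree blocked g fuel → j ∈ blocked := by
  intro fuel
  induction fuel with
  | zero => intro g h; omega
  | succ fuel ih =>
    intro g h
    by_cases hg : g ∈ blocked
    · have hcont : PySem.Set.contains blocked g = true := by
        simpa [PySem.Set.contains_iff] using hg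
      have hstep : (blocked.filter (fun b => g + 1 ≤ b)).length
          < (blocked.filter (fun b => g ≤ b)).length := by
        have hsub : blocked.filter (fun b => g + 1 ≤ b)
            = (blocked.filter (fun b => g ≤ b)).filter (fun b => b ≠ g) := by
          rw [List.filter_filter]
          apply List.filter_congr
          intro b _
          rw [Bool.eq_iff_iff]
          simp
          omega
        rw [hsub]
        apply List.length_filter_lt_length_iff_exists.mpr
        exact ⟨g, by simp [List.mem_filter, hg], by simp⟩
      obtain ⟨ih1, ih2, ih3⟩ := ih (g + 1) (by omega)
      have hred : pvFirstFree blocked g (fuel + 1) = pvFirstFree blocked (g + 1) fuel := by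
        simp only [pvFirstFree, hcont, if_true]
      rw [hred]
      exact ⟨ih1, by omega, fun j hgj hjlt =>
        (Nat.eq_or_lt_of_le hgj).elim (fun e => e ▸ hg) (fun hlt => ih3 j hlt hjlt)⟩
    · have hcont : PySem.Set.contains blocked g = false := by
        rw [← Bool.not_eq_true, PySem.Set.contains_iff]
        exact hg
      have hred : pvFirstFree blocked g (fuel + 1) = g := by
        simp only [pvFirstFree, hcont, Bool.false_eq_true, if_false]
      rw [hred]
      exact ⟨hg, Nat.le_refl g, fun j h1 h2 => absurd h2 (by omega)⟩

lemma pvPlaceA_spec (cs : List String) (tid : String) :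
    ∀ (groups : List (List String)) (m : Nat),
      m ≤ groups.length →
      (∀ i, i < m → (groups.getD i []).any (fun o => cs.contains o) = true) →
      (m < groups.length → (groups.getD m []).any (fun o => cs.contains o) = false) →
      pvPlaceA cs tid groups =
        if m = groups.length then groups ++ [[tid]]
        else groups.set m (groups.getD m [] ++ [tid]) := by
  intro groups
  induction groups with
  | nil =>
    intro m hle _ _
    have : m = 0 := Nat.le_zero.mp hle
    subst this
    simp [pvPlaceA]
  | cons g rest ih =>
    intro m hle hblk hfree
    cases m with
    | zero =>
      have hf : g.any (fun o => cs.contains o) = false := by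
        have := hfree (by simp)
        simpa using this
      simp only [pvPlaceA, hf, Bool.false_eq_true, if_false]
      simp
    | succ m' =>
      have hb : g.any (fun o => cs.contains o) = true := by
        have := hblk 0 (Nat.succ_pos m')
        simpa using this
      have hrec := ih m' (by simpa using hle)
        (fun i hi => by simpa using hblk (i + 1) (by omega))
        (fun hlt => by simpa using hfree (by simpa using Nat.succ_lt_succ hlt))
      simp only [pvPlaceA, hb, if_true, hrec]
      by_cases he : m' = rest.length
      · simp [he]
      · simp [he]

lemma pvStep_eq (conflicts : List (String × List String)) (tid : String)
    (groups : List (List String)) (assigned : PySem.Set String) (pos : PySem.Dict String Nat)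
    (h : pvInv groups assigned pos) :
    (if PySem.Set.contains assigned tid then (groups, assigned)
     else (pvPlaceA (pvConfA conflicts tid) tid groups, PySem.Set.add assigned tid)).1
      = (pvStepB conflicts (groups, pos) tid).1
    ∧ pvInv (pvStepB conflicts (groups, pos) tid).1
        (if PySem.Set.contains assigned tid then (groups, assigned)
         else (pvPlaceA (pvConfA conflicts tid) tid groups, PySem.Set.add assigned tid)).2
        (pvStepB conflicts (groups, pos) tid).2 := by
  obtain ⟨h1, h2⟩ := h
  have hc : PySem.Set.contains assigned tid = pos.contains tid := h1 tid
  by_cases hin : pos.contains tid = true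
  · constructor
    · simp only [pvStepB, hc, hin, if_true]
    · simp only [pvStepB, hc, hin, if_true]
      exact ⟨h1, h2⟩
  · have hinf : pos.contains tid = false := by simpa using hin
    set cs := pvConfA conflicts tid with hcs
    set blocked : PySem.Set Nat := PySem.Set.ofList (cs.filterMap (fun c => pos.get? c)) with hbl
    have hmem : ∀ i : Nat, i ∈ blocked ↔
        (i < groups.length ∧ ((groups.getD i []).any (fun o => cs.contains o)) = true) := by
      intro i
      rw [hbl, PySem.Set.mem_ofList, List.mem_filterMap]
      constructor
      · rintro ⟨c, hcmem, hget⟩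
        obtain ⟨hlt, hmemg⟩ := (h2 c i).mp hget
        refine ⟨hlt, ?_⟩
        simp only [List.any_eq_true, List.contains_iff_mem]
        exact ⟨c, hmemg, by simpa using hcmem⟩
      · rintro ⟨hlt, hany⟩
        simp only [List.any_eq_true, List.contains_iff_mem] at hany
        obtain ⟨c, hcg, hccs⟩ := hany
        exact ⟨c, by simpa using hccs, (h2 c i).mpr ⟨hlt, hcg⟩⟩
    have hff := pvFirstFree_spec blocked (blocked.length + 1) 0 (by
      have hfeq : blocked.filter (fun b => decide (0 ≤ b)) = blocked := by
        apply List.filter_eq_self.mpr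
        intro b _
        simp
      rw [hfeq]; omega)
    set g := pvFirstFree blocked 0 (blocked.length + 1) with hg
    obtain ⟨hgnot, -, hgall⟩ := hff
    have hgle : g ≤ groups.length := by
      by_contra hlt
      exact absurd ((hmem groups.length).mp (hgall _ (Nat.zero_le _) (by omega))).1 (lt_irrefl _)
    have hplace := pvPlaceA_spec cs tid groups g hgle
      (fun i hi => ((hmem i).mp (hgall i (Nat.zero_le i) hi)).2)
      (fun hlt => by
        by_contra hb
        have hbt : (groups.getD g []).any (fun o => cs.contains o) = true := by
          simpa using hb
        exact hgnot ((hmem g).mpr ⟨hlt, hbt⟩))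
    have hstepB : pvStepB conflicts (groups, pos) tid =
        ((if g = groups.length then groups ++ [[tid]]
          else groups.set g (groups.getD g [] ++ [tid])), pos.insert tid g) := by
      simp only [pvStepB, hinf, Bool.false_eq_true, if_false]
      rfl
    have hnone : pos.get? tid = none := by
      rw [PySem.Dict.get?_eq_none_iff_contains]
      exact hinf
    have htidng : ∀ i, ¬(i < groups.length ∧ tid ∈ groups.getD i []) := by
      intro i hi
      have := (h2 tid i).mpr hi
      rw [hnone] at this
      simp at this
    set G' := (if g = groups.length then groups ++ [[tid]]
      else groups.set g (groups.getD g [] ++ [tid])) with hG'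
    have hGmem : ∀ (t : String) (j : Nat),
        (j < G'.length ∧ t ∈ G'.getD j []) ↔
        ((j < groups.length ∧ t ∈ groups.getD j []) ∨ (t = tid ∧ j = g)) := by
      intro t j
      by_cases hgl : g = groups.length
      · have hlen : G'.length = groups.length + 1 := by rw [hG', if_pos hgl]; simp
        have hgd : G'.getD j ([] : List String) =
            if j < groups.length then groups.getD j []
            else if j = groups.length then [tid] else [] := by
          rw [hG', if_pos hgl, List.getD_eq_getElem?_getD, List.getElem?_append]
          by_cases hj : j < groups.length
          · simp [hj, List.getD_eq_getElem?_getD]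
          · by_cases hj2 : j = groups.length
            · simp [hj2]
            · have h3 : ¬ (j - groups.length < 1) := by omega
              simp [hj, hj2, h3]
        rw [hlen, hgd]
        by_cases hj : j < groups.length
        · rw [if_pos hj]
          constructor
          · rintro ⟨-, hm⟩; exact Or.inl ⟨hj, hm⟩
          · rintro (⟨-, hm⟩ | ⟨-, he⟩)
            · exact ⟨by omega, hm⟩
            · omega
        · rw [if_neg hj]
          by_cases hj2 : j = groups.length
          · rw [if_pos hj2]
            constructor
            · rintro ⟨-, hm⟩
              exact Or.inr ⟨List.mem_singleton.mp hm, by omega⟩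
            · rintro (⟨h', -⟩ | ⟨ht, -⟩)
              · omega
              · exact ⟨by omega, by simp [ht]⟩
          · rw [if_neg hj2]
            constructor
            · rintro ⟨-, hm⟩; simp at hm
            · rintro (⟨h', -⟩ | ⟨-, he⟩)
              · omega
              · omega
      · have hglt : g < groups.length := by omega
        have hlen : G'.length = groups.length := by rw [hG', if_neg hgl]; simp
        have hgd : G'.getD j ([] : List String) =
            if j = g then groups.getD g [] ++ [tid] else groups.getD j [] := by
          rw [hG', if_neg hgl, List.getD_eq_getElem?_getD, List.getElem?_set]
          by_cases hj : j = g
          · simp [hj, hglt, List.getD_eq_getElem?_getD]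
          · simp [hj, Ne.symm hj, List.getD_eq_getElem?_getD]
        rw [hlen, hgd]
        by_cases hj : j = g
        · rw [if_pos hj]
          constructor
          · rintro ⟨hl, hm⟩
            rcases List.mem_append.mp hm with hm' | hm'
            · exact Or.inl ⟨hl, by rw [hj]; exact hm'⟩
            · exact Or.inr ⟨List.mem_singleton.mp hm', hj⟩
          · rintro (⟨hl, hm⟩ | ⟨ht, -⟩)
            · exact ⟨by omega, List.mem_append.mpr (Or.inl (by rw [← hj]; exact hm))⟩
            · exact ⟨by omega, List.mem_append.mpr (Or.inr (by simp [ht]))⟩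
        · rw [if_neg hj]
          constructor
          · rintro ⟨hl, hm⟩; exact Or.inl ⟨by omega, hm⟩
          · rintro (⟨hl, hm⟩ | ⟨-, he⟩)
            · exact ⟨by omega, hm⟩
            · exact absurd he hj
    rw [hstepB]
    simp only [hc, hinf, Bool.false_eq_true, if_false]
    refine ⟨hplace, ?_, ?_⟩
    · intro t
      rw [Bool.eq_iff_iff, PySem.Set.contains_iff, PySem.Set.mem_add,
        PySem.Dict.contains_insert, ← PySem.Set.contains_iff, h1 t]
      simp [or_comm]
    · intro t i
      rw [PySem.Dict.get?_insert]
      by_cases ht : t = tid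
      · rw [if_pos ht]
        constructor
        · intro h'
          have hig : g = i := by simpa using h'
          subst hig
          exact (hGmem t g).mpr (Or.inr ⟨ht, rfl⟩)
        · intro hri
          rcases (hGmem t i).mp hri with ⟨hl, hm⟩ | ⟨-, he⟩
          · exact absurd ⟨hl, by rw [← ht]; exact hm⟩ (htidng i)
          · simp [he]
      · rw [if_neg ht]
        rw [h2 t i]
        constructor
        · intro hx; exact (hGmem t i).mpr (Or.inl hx)
        · intro hx
          rcases (hGmem t i).mp hx with hx' | ⟨ht', -⟩
          · exact hx'
          · exact absurd ht' ht

lemma pvFold_eq (conflicts : List (String × List String)) :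
    ∀ (tids : List String) (groups : List (List String)) (assigned : PySem.Set String)
      (pos : PySem.Dict String Nat), pvInv groups assigned pos →
      (tids.foldl
        (fun st tid =>
          if PySem.Set.contains st.2 tid then st
          else (pvPlaceA (pvConfA conflicts tid) tid st.1, PySem.Set.add st.2 tid))
        (groups, assigned)).1
      = (tids.foldl (pvStepB conflicts) (groups, pos)).1 := by
  intro tids
  induction tids with
  | nil => intro groups assigned pos _; rfl
  | cons tid rest ih =>
    intro groups assigned pos hinv
    obtain ⟨he, hinvNext⟩ := pvStep_eq conflicts tid groups assigned pos hinv
    rw [List.foldl_cons, List.foldl_cons]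
    have hA : (if PySem.Set.contains assigned tid then (groups, assigned)
        else (pvPlaceA (pvConfA conflicts tid) tid groups, PySem.Set.add assigned tid))
        = ((pvStepB conflicts (groups, pos) tid).1,
           (if PySem.Set.contains assigned tid then (groups, assigned)
            else (pvPlaceA (pvConfA conflicts tid) tid groups, PySem.Set.add assigned tid)).2) :=
      Prod.ext he rfl
    have hB : pvStepB conflicts (groups, pos) tid
        = ((pvStepB conflicts (groups, pos) tid).1, (pvStepB conflicts (groups, pos) tid).2) :=
      (Prod.mk.eta).symm
    rw [hA, hB]
    exact ih _ _ _ hinvNext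

-- ===== VERDICT (by name: the statement is the Claim_ definition above) =====
theorem greedy_parallel_groups_py_spec : Claim_equal_greedy_parallel_groups_py := by
  intro task_ids conflicts _ _
  unfold Spec_greedy_parallel_groups_py greedy_parallel_groups_py greedy_parallel_groups_py_alt
  refine pvFold_eq conflicts task_ids [] PySem.Set.empty PySem.Dict.empty ?_
  constructor
  · intro t; rfl
  · intro t i; simp [PySem.Dict.get?_empty]
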